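-- pv_equiv track=rewrite | github.com/Gausslab-SeoulOffice/problems | yunjae/ox_cumsum2.py | ox_cumsum
-- ===== SOURCE A (Python) =====
-- def ox_cumsum(line):
--   ans = 0
--   tokens = [t for t in line.split('X') if t!='']  # X만 빼고, O로 이뤄진 토큰들만 집계
--
--   if not tokens:
--     return 0
--   else:
--     for token in tokens:
--       ans += sum(range(1, len(token)+1)) # 리스트를 별도로 만들지 않고, 이렇게 range를 이용해서 누적합을 구해도 됨
--   return ans
-- ===== SOURCE B (Python) =====
-- def ox_cumsum(line):
--   ans = 0
--   streak = 0
--   for ch in line: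
--     if ch == 'X':
--       streak = 0
--     else:
--       streak += 1
--       ans += streak
--   return ans
-- ===== Notes on version B (the rewrite author's own statement) =====
-- stated objective: simpler
-- what changed: Replaces the split on the separator plus per-token triangular sums (a token list and a range per token) with a single left-to-right pass keeping a running streak counter added to the answer.
import Mathlib
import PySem

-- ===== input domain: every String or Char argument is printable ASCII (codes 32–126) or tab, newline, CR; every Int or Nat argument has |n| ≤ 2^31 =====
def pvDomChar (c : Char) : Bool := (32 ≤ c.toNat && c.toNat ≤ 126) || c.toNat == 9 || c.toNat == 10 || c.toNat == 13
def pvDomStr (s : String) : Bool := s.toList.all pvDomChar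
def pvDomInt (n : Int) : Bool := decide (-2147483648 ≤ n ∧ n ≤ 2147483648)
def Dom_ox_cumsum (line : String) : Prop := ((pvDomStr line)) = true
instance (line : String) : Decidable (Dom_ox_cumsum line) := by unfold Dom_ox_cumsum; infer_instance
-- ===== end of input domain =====

-- B replaces the split-then-sum-triangles decomposition by a single pass with a running streak counter (same return value).

-- ===== PORT A =====
def ox_cumsum (line : String) : Int :=
  let tokens := ((PySem.Str.split? line "X").getD []).filter (fun t => t != "")
  if tokens.isEmpty then 0
  else tokens.foldl (fun ans t => ans + (PySem.List.pyRange 1 (PySem.Str.len t + 1) 1).sum) 0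

-- ===== PORT B =====
def ox_cumsum_alt (line : String) : Int :=
  (line.toList.foldl
    (fun (st : Int × Int) c =>
      if c = 'X' then (st.1, 0) else (st.1 + st.2 + 1, st.2 + 1))
    (0, 0)).1

-- ===== PRECONDITION & SPEC =====
def Spec_ox_cumsum (line : String) (out : Int) : Prop := out = ox_cumsum_alt line
instance (line : String) (out : Int) : Decidable (Spec_ox_cumsum line out) := by unfold Spec_ox_cumsum; infer_instance

-- ===== CLAIM (what is proved, stated in full; the proofs are below) =====
def Claim_equal_ox_cumsum : Prop := ∀ (line : String), Dom_ox_cumsum line → Spec_ox_cumsum line (ox_cumsum line)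

-- ===== LEMMAS AND PROOFS =====

-- Recursive specification of splitting on the single separator 'X'.
def splitSpec : List Char → List (List Char)
  | [] => [[]]
  | c :: r => if c = 'X' then [] :: splitSpec r else (splitSpec r).modifyHead (c :: ·)

-- Triangular numbers.
def tri : Nat → Int
  | 0 => 0
  | n + 1 => tri n + (n + 1)

-- The contribution of the rest of the string to B's answer, given the current streak.
def FB : List Char → Nat → Int
  | [], _ => 0
  | c :: r, k => if c = 'X' then FB r 0 else ((k : Int) + 1) + FB r (k + 1)

-- The final streak of B's loop.
def FS : List Char → Nat → Nat
  | [], k => k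
  | c :: r, k => if c = 'X' then FS r 0 else FS r (k + 1)

theorem splitSpec_ne_nil (cs : List Char) : splitSpec cs ≠ [] := by
  cases cs with
  | nil => simp [splitSpec]
  | cons c r =>
    simp only [splitSpec]
    split
    · simp
    · intro h
      exact splitSpec_ne_nil r (by simpa using congrArg List.length h)

theorem go_spec (fuel : Nat) (l cur : List Char) (acc : List (List Char))
    (h : l.length < fuel) :
    PySem.Chars.splitOn.go ['X'] fuel l cur acc
      = acc.reverse ++ (splitSpec l).modifyHead (fun t => cur.reverse ++ t) := by
  induction fuel generalizing l cur acc with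
  | zero => omega
  | succ fuel ih =>
    cases l with
    | nil => simp [PySem.Chars.splitOn.go, splitSpec]
    | cons c rest =>
      by_cases hc : c = 'X'
      · subst hc
        have hpre : List.isPrefixOf ['X'] ('X' :: rest) = true := by
          simp [List.isPrefixOf]
        rw [PySem.Chars.splitOn.go, if_pos hpre]
        simp only [List.length_singleton, List.drop_succ_cons, List.drop_zero]
        rw [ih rest [] (cur.reverse :: acc) (by simpa using Nat.lt_of_succ_lt_succ h)]
        simp [splitSpec, show (fun t : List Char => t) = id from rfl]
      · have hpre : List.isPrefixOf ['X'] (c :: rest) = false := by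
          simp [List.isPrefixOf]
          exact fun hx => (hc hx.symm).elim
        rw [PySem.Chars.splitOn.go, if_neg (by simp [hpre])]
        rw [ih rest (c :: cur) acc (by simpa using Nat.lt_of_succ_lt_succ h)]
        simp only [splitSpec, if_neg hc, List.modifyHead_modifyHead]
        congr 1
        apply congrArg (fun f => List.modifyHead f (splitSpec rest))
        funext t
        simp

theorem splitOn_eq_splitSpec (cs : List Char) :
    PySem.Chars.splitOn cs ['X'] = splitSpec cs := by
  have := go_spec (cs.length + 1) cs [] [] (by omega)
  simpa [PySem.Chars.splitOn, show (fun t : List Char => t) = id from rfl] using this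

theorem foldB (cs : List Char) (a : Int) (k : Nat) :
    cs.foldl (fun (st : Int × Int) c =>
        if c = 'X' then (st.1, 0) else (st.1 + st.2 + 1, st.2 + 1)) (a, (k : Int))
      = (a + FB cs k, (FS cs k : Int)) := by
  induction cs generalizing a k with
  | nil => simp [FB, FS]
  | cons c r ih =>
    by_cases hc : c = 'X'
    · simp only [List.foldl_cons, FB, FS, hc, if_true]
      simpa using ih a 0
    · have hcast : ((k : Int) + 1) = ((k + 1 : Nat) : Int) := by push_cast; ring
      simp only [List.foldl_cons, if_neg hc, FB, FS]
      rw [hcast, ih]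
      rw [Prod.mk.injEq]
      refine ⟨by push_cast; ring, rfl⟩

theorem sum_pyRange (n : Nat) :
    (PySem.List.pyRange 1 ((n : Int) + 1) 1).sum = tri n := by
  induction n with
  | zero => decide
  | succ n ih =>
    have h : (1 : Int) ≤ (n : Int) + 1 := by omega
    have hcast : ((n + 1 : Nat) : Int) + 1 = ((n : Int) + 1) + 1 := by push_cast; ring
    rw [hcast, PySem.List.pyRange_one_succ_right h]
    simp only [List.sum_append, List.sum_cons, List.sum_nil, ih, tri]
    ring

theorem key (cs : List Char) (k : Nat) (t0 : List Char) (ts : List (List Char))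
    (h : splitSpec cs = t0 :: ts) :
    tri (k + t0.length) + ((ts.map (fun t => tri t.length)).sum) = tri k + FB cs k := by
  induction cs generalizing k t0 ts with
  | nil =>
    simp only [splitSpec, List.cons.injEq] at h
    obtain ⟨h0, h1⟩ := h
    subst h0; subst h1
    simp [FB]
  | cons c r ih =>
    cases heq : splitSpec r with
    | nil => exact absurd heq (splitSpec_ne_nil r)
    | cons u0 us =>
      by_cases hc : c = 'X'
      · simp only [splitSpec, if_pos hc] at h
        obtain ⟨h0, h1⟩ := List.cons.inj h
        subst h0; subst h1
        have hIH := ih 0 u0 us heq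
        simp only [FB, if_pos hc]
        rw [heq]
        simp only [List.map_cons, List.sum_cons, Nat.zero_add, List.length_nil, Nat.add_zero] at hIH ⊢
        simp only [tri] at hIH ⊢
        linarith
      · simp only [splitSpec, if_neg hc, heq, List.modifyHead] at h
        obtain ⟨h0, h1⟩ := List.cons.inj h
        subst h1
        have hIH := ih (k + 1) u0 us heq
        have hlen : k + t0.length = (k + 1) + u0.length := by
          subst h0; simp only [List.length_cons]; omega
        rw [hlen]
        simp only [FB, if_neg hc]
        have htri : tri (k + 1) = tri k + ((k : Int) + 1) := by
          simp [tri]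
        linarith

theorem sum_filter_ne_empty (g : String → Int) (hg : g "" = 0) (toks : List String) :
    ((toks.filter (fun t => t != "")).map g).sum = (toks.map g).sum := by
  induction toks with
  | nil => rfl
  | cons t r ih =>
    by_cases ht : t = ""
    · subst ht
      simpa [hg] using ih
    · simp [ht, ih]

-- ===== VERDICT (by name: the statement is the Claim_ definition above) =====
theorem ox_cumsum_spec : Claim_equal_ox_cumsum := by
  intro line _
  unfold Spec_ox_cumsum ox_cumsum ox_cumsum_alt
  set cs := line.toList with hcs
  have hB : (cs.foldl (fun (st : Int × Int) c =>
      if c = 'X' then (st.1, 0) else (st.1 + st.2 + 1, st.2 + 1)) (0, 0)).1 = FB cs 0 := by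
    have := foldB cs 0 0
    simp only [Nat.cast_zero] at this
    rw [this]; ring
  rw [hB]
  have hsplit : PySem.Str.split? line "X"
      = some (((splitSpec cs).map String.ofList)) := by
    have hx : ("X" : String).toList = ['X'] := by decide
    simp [PySem.Str.split?, PySem.Chars.split?, hx, splitOn_eq_splitSpec, hcs]
  rw [hsplit]
  set g : String → Int :=
    fun t => (PySem.List.pyRange 1 (PySem.Str.len t + 1) 1).sum with hg
  have hg0 : g "" = 0 := by decide
  set toks := ((splitSpec cs).map String.ofList).filter (fun t => t != "") with htk
  have hA : (if toks.isEmpty then (0 : Int)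
      else toks.foldl (fun ans t => ans + g t) 0) = (toks.map g).sum := by
    by_cases he : toks.isEmpty
    · rw [if_pos he]
      rw [List.isEmpty_iff] at he
      simp [he]
    · rw [if_neg he, PySem.List.foldl_add]
      ring
  simp only [Option.getD_some]
  rw [hA, htk, sum_filter_ne_empty g hg0]
  have hmap : (((splitSpec cs).map String.ofList).map g)
      = (splitSpec cs).map (fun t => tri t.length) := by
    rw [List.map_map]
    apply List.map_congr_left
    intro t _
    simp only [Function.comp, hg, PySem.Str.len, String.toList_ofList]
    exact sum_pyRange t.length
  rw [hmap]
  cases heq : splitSpec cs with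
  | nil => exact absurd heq (splitSpec_ne_nil cs)
  | cons t0 ts =>
    have hk := key cs 0 t0 ts heq
    simp only [Nat.zero_add] at hk
    simp only [List.map_cons, List.sum_cons]
    simp only [tri] at hk
    linarith
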